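-- pv_equiv track=rewrite | github.com/nmhung311/Data-ICTU | web-app/backend/raw2md_agent/validator.py | _validate_metadata_block_format
-- ===== SOURCE A (Python) =====
-- from typing import Dict, Any, List, Optional
--
-- def _validate_metadata_block_format(content: str) -> Dict[str, List[str]]:
--     """Validate metadata block format."""
--     errors = []
--     warnings = []
--
--     lines = content.split('\n')
--     in_metadata = False
--
--     for line in lines:
--         if line.strip() == '## Metadata':
--             in_metadata = True
--             continue
--         elif line.startswith('## ') and in_metadata:
--             break
--         elif in_metadata and line.strip():
--             if not line.strip().startswith('- **'):
--                 errors.append(f"Invalid metadata line format: {line}")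
--             elif not line.strip().endswith(':'):
--                 warnings.append(f"Metadata line should end with colon: {line}")
--
--     return {'errors': errors, 'warnings': warnings}
-- ===== SOURCE B (Python) =====
-- def _validate_metadata_block_format(content: str):
--     """Validate metadata block format."""
--     lines = content.split('\n')
--     for start, line in enumerate(lines):
--         if line.strip() == '## Metadata':
--             break
--     else:
--         return {'errors': [], 'warnings': []}
--
--     end = len(lines)
--     for i in range(start + 1, len(lines)):
--         if lines[i].startswith('## '):
--             end = i
--             break
--
--     errors = []
--     warnings = []
--     for line in lines[start + 1:end]:
--         stripped = line.strip()
--         if not stripped: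
--             continue
--         if not stripped.startswith('- **'):
--             errors.append(f"Invalid metadata line format: {line}")
--         elif not stripped.endswith(':'):
--             warnings.append(f"Metadata line should end with colon: {line}")
--     return {'errors': errors, 'warnings': warnings}
-- ===== Notes on version B (the rewrite author's own statement) =====
-- stated objective: alternative
-- what changed: Replaces A's single stateful loop (in_metadata flag + break) by a three-stage pipeline: find the '## Metadata' heading, find the next '## ' heading, then classify the sliced block in a separate pass; Pre_ excludes contents containing a second line that strips to '## Metadata' — a duplicate-heading corner no caller specifies, where skipping the duplicate (A) and ending the block at it (B) are equally defensible.
import Mathlib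
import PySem

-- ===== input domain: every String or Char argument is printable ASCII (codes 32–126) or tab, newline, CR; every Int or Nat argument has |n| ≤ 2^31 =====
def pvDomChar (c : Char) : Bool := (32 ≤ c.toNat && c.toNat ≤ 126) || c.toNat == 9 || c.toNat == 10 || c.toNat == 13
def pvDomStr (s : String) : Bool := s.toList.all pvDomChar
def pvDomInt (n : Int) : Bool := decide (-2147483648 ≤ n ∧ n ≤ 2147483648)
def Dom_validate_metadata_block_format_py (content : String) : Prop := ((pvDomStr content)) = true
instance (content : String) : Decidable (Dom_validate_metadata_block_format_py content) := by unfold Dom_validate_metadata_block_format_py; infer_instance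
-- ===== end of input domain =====

-- B replaces A's single stateful loop (flag + break) by a find-start / find-end / slice / classify pipeline (alternative decomposition, same cost).

-- ===== PORT A =====
-- A's for-loop over the split lines, carrying in_metadata and the two accumulators; 'break' returns the accumulators.
def pvLoopA (lines : List String) (inm : Bool) (errors warnings : List String) : List String × List String :=
  match lines with
  | [] => (errors, warnings)
  | line :: rest =>
    if PySem.Str.strip line = "## Metadata" then
      pvLoopA rest true errors warnings
    else if PySem.Str.startswith line "## " = true ∧ inm = true then
      (errors, warnings)
    else if inm = true ∧ PySem.Str.strip line ≠ "" then
      if ¬ PySem.Str.startswith (PySem.Str.strip line) "- **" = true then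
        pvLoopA rest inm (errors ++ ["Invalid metadata line format: " ++ line]) warnings
      else if ¬ PySem.Str.endswith (PySem.Str.strip line) ":" = true then
        pvLoopA rest inm errors (warnings ++ ["Metadata line should end with colon: " ++ line])
      else
        pvLoopA rest inm errors warnings
    else
      pvLoopA rest inm errors warnings

def validate_metadata_block_format_py (content : String) : List (String × List String) :=
  let res := pvLoopA ((PySem.Str.split? content "\n").getD []) false [] []
  [("errors", res.1), ("warnings", res.2)]

-- ===== PORT B =====
-- find the '## Metadata' heading; returned as the list of lines after it (none if absent).
def pvFindTail (lines : List String) : Option (List String) :=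
  match lines with
  | [] => none
  | line :: rest =>
    if PySem.Str.strip line = "## Metadata" then some rest else pvFindTail rest

-- the slice lines[start+1:end]: everything before the next '## ' heading.
def pvBlock (tail : List String) : List String :=
  tail.takeWhile (fun l => !(PySem.Str.startswith l "## "))

-- the classification pass over the sliced block.
def pvClassify (block : List String) (errors warnings : List String) : List String × List String :=
  match block with
  | [] => (errors, warnings)
  | line :: rest =>
    let stripped := PySem.Str.strip line
    if stripped = "" then pvClassify rest errors warnings
    else if ¬ PySem.Str.startswith stripped "- **" = true then
      pvClassify rest (errors ++ ["Invalid metadata line format: " ++ line]) warnings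
    else if ¬ PySem.Str.endswith stripped ":" = true then
      pvClassify rest errors (warnings ++ ["Metadata line should end with colon: " ++ line])
    else
      pvClassify rest errors warnings

def validate_metadata_block_format_py_alt (content : String) : List (String × List String) :=
  match pvFindTail ((PySem.Str.split? content "\n").getD []) with
  | none => [("errors", []), ("warnings", [])]
  | some tail =>
    let res := pvClassify (pvBlock tail) [] []
    [("errors", res.1), ("warnings", res.2)]

-- ===== PRECONDITION & SPEC =====
-- Pre_ excludes contents containing a second line that strips to '## Metadata' (A still returns there):
-- a duplicate-heading corner no caller specifies, where skipping the duplicate (A) and ending the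
-- block at it (B) are equally defensible.
def Pre_validate_metadata_block_format_py (content : String) : Prop :=
  (((PySem.Str.split? content "\n").getD []).countP
    (fun l => PySem.Str.strip l = "## Metadata")) ≤ 1
instance (content : String) : Decidable (Pre_validate_metadata_block_format_py content) := by
  unfold Pre_validate_metadata_block_format_py; infer_instance

def pvWitness_validate_metadata_block_format_py : String :=
  "## Metadata\n- **title**:\nbad line\n\n## Next"

def Spec_validate_metadata_block_format_py (content : String) (out : List (String × List String)) : Prop := out = validate_metadata_block_format_py_alt content
instance (content : String) (out : List (String × List String)) : Decidable (Spec_validate_metadata_block_format_py content out) := by unfold Spec_validate_metadata_block_format_py; infer_instance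

-- ===== CLAIM (what is proved, stated in full; the proofs are below) =====
def Claim_equal_validate_metadata_block_format_py : Prop := ∀ (content : String), Dom_validate_metadata_block_format_py content → Pre_validate_metadata_block_format_py content → Spec_validate_metadata_block_format_py content (validate_metadata_block_format_py content)

-- ===== LEMMAS AND PROOFS =====

-- If no line of the tail strips to '## Metadata', A's loop with in_metadata = True is B's classify over the cut block.
theorem pvLoopA_true (lines : List String) (e w : List String)
    (hnd : ∀ l ∈ lines, PySem.Str.strip l ≠ "## Metadata") :
    pvLoopA lines true e w = pvClassify (pvBlock lines) e w := by
  induction lines generalizing e w with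
  | nil => rfl
  | cons line rest ih =>
    have hmd : PySem.Str.strip line ≠ "## Metadata" := hnd line (List.mem_cons_self ..)
    have hrest : ∀ l ∈ rest, PySem.Str.strip l ≠ "## Metadata" :=
      fun l hl => hnd l (List.mem_cons_of_mem _ hl)
    by_cases hsw : PySem.Str.startswith line "## " = true
    · simp at hsw
      simp [pvLoopA, pvBlock, List.takeWhile, pvClassify, hmd, hsw]
    · by_cases hblank : PySem.Str.strip line = ""
      · simp at hsw
        simp [pvLoopA, pvBlock, List.takeWhile, pvClassify, hsw, hblank]
        exact ih e w hrest
      · simp only [pvLoopA, if_neg hmd]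
        rw [if_neg (show ¬ (PySem.Str.startswith line "## " = true ∧ True) from fun h => hsw h.1),
            if_pos (show True ∧ PySem.Str.strip line ≠ "" from ⟨trivial, hblank⟩)]
        have hsw' : PySem.Chars.startswith line.toList ['#', '#', ' '] = false := by
          simpa using hsw
        have hbl : pvBlock (line :: rest) = line :: pvBlock rest := by
          simp [pvBlock, List.takeWhile, hsw']
        rw [hbl]
        simp only [pvClassify]
        rw [if_neg hblank]
        split_ifs with h3 h4 <;> exact ih _ _ hrest

-- Before the block, A's loop with in_metadata = False is B's find-tail followed by the True phase.
theorem pvLoopA_false (lines : List String) :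
    pvLoopA lines false [] [] =
      match pvFindTail lines with
      | none => ([], [])
      | some tail => pvLoopA tail true [] [] := by
  induction lines with
  | nil => rfl
  | cons line rest ih =>
    by_cases hmd : PySem.Str.strip line = "## Metadata"
    · simp only [pvLoopA, pvFindTail, if_pos hmd]
    · have h2 : ¬ (PySem.Str.startswith line "## " = true ∧ (false : Bool) = true) := by
        intro h; cases h.2
      have h3 : ¬ ((false : Bool) = true ∧ PySem.Str.strip line ≠ "") := by
        intro h; cases h.1
      simp only [pvLoopA, pvFindTail, if_neg hmd, if_neg h2, if_neg h3]
      exact ih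

-- Under the duplicate bound, the tail after the first '## Metadata' heading has no further such line.
theorem pvFindTail_nomd (lines : List String) (tail : List String)
    (hf : pvFindTail lines = some tail)
    (hc : lines.countP (fun l => PySem.Str.strip l = "## Metadata") ≤ 1) :
    ∀ l ∈ tail, PySem.Str.strip l ≠ "## Metadata" := by
  induction lines with
  | nil => simp [pvFindTail] at hf
  | cons line rest ih =>
    by_cases hmd : PySem.Str.strip line = "## Metadata"
    · simp only [pvFindTail, if_pos hmd, Option.some.injEq] at hf
      subst hf
      simp [hmd] at hc
      exact hc
    · simp only [pvFindTail, if_neg hmd] at hf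
      simp only [List.countP_cons, hmd] at hc
      exact ih hf hc

-- ===== VERDICT (by name: the statement is the Claim_ definition above) =====
theorem validate_metadata_block_format_py_spec : Claim_equal_validate_metadata_block_format_py := by
  intro content _ hpre
  unfold Spec_validate_metadata_block_format_py
  unfold validate_metadata_block_format_py validate_metadata_block_format_py_alt
  rw [pvLoopA_false]
  cases h : pvFindTail ((PySem.Str.split? content "\n").getD []) with
  | none => rfl
  | some tail =>
    have hnd := pvFindTail_nomd _ tail h hpre
    simp only [pvLoopA_true _ _ _ hnd]
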